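-- pv_equiv track=rewrite | github.com/Storm1seven/Competitive-Programming | Codechef/Shastra 2020/SPOC010.py | brute
-- ===== SOURCE A (Python) =====
-- def brute(a):
--     count = 0
--     for i in range(a+1):
--         z = []
--         while i:
--             z.append(i%3)
--             i//=3
--         z = z[::-1]
--         if z.count(2) == 0:
--             count+=1
--     return count
-- ===== SOURCE B (Python) =====
-- def brute(a):
--     # O(log a): recursive count over base-3 structure; returns (count in [0,n], n has no digit 2)
--     if a < 0:
--         return 0
--     return _f(a)[0]
--
-- def _f(n):
--     if n == 0:
--         return 1, True
--     q, r = divmod(n, 3)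
--     c, g = _f(q)
--     if g:
--         cn = 2 * (c - 1) + min(r, 1) + 1
--     else:
--         cn = 2 * c
--     return cn, g and r <= 1
-- ===== Notes on version B (the rewrite author's own statement) =====
-- stated objective: faster
-- what changed: A tests every i in 0..a by extracting its base-3 digits; B computes the count with one recursion over the base-3 digits of a itself (digit DP), O(log a) instead of O(a log a).
import Mathlib
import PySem

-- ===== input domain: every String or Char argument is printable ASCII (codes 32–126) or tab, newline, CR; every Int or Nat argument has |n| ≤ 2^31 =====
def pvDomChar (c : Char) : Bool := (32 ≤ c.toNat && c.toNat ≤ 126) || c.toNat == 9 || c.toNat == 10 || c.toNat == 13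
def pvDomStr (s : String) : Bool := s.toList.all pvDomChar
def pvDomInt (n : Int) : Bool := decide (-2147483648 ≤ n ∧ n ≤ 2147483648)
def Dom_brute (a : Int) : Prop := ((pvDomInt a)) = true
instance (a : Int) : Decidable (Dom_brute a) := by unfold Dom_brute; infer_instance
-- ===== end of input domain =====

-- B replaces A's O(a) scan of 0..a by an O(log a) recursive base-3 digit count; equal return values proved on all of Dom.


-- ===== PORT A =====
-- 'while i: z.append(i%3); i//=3' — loop body; guard '0 < i' = Python's truthiness 'i ≠ 0'
-- made a totality guard (the loop variable comes from range(a+1), so i ≥ 0 always).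
def pyDigitsA (i : Int) : List Int :=
  if _h : 0 < i then PySem.Int.mod i 3 :: pyDigitsA (PySem.Int.floordiv i 3) else []
termination_by i.toNat
decreasing_by
  simp only [PySem.Int.floordiv_eq_ediv_of_pos (by omega : (0:Int) < 3)]
  omega

def brute (a : Int) : Int :=
  (PySem.List.pyRange 0 (a + 1) 1).foldl
    (fun count i =>
      let z := pyDigitsA i
      let z := (PySem.List.slice? z none none (-1)).getD []   -- z = z[::-1]
      if PySem.List.count z 2 == 0 then count + 1 else count)
    0

-- ===== PORT B =====
-- _f(n) = (count of k in [0,n] with no base-3 digit 2, n itself has no base-3 digit 2);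
-- guard '0 < n' = Python's 'n == 0' base case made a totality guard (only called with n ≥ 0).
def bf (n : Int) : Int × Bool :=
  if _h : 0 < n then
    let q := PySem.Int.floordiv n 3
    let r := PySem.Int.mod n 3
    let p := bf q
    let cn := if p.2 then 2 * (p.1 - 1) + min r 1 + 1 else 2 * p.1
    (cn, p.2 && decide (r ≤ 1))
  else (1, true)
termination_by n.toNat
decreasing_by
  simp only [PySem.Int.floordiv_eq_ediv_of_pos (by omega : (0:Int) < 3)]
  omega

def brute_alt (a : Int) : Int :=
  if a < 0 then 0 else (bf a).1

-- ===== PRECONDITION & SPEC =====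
def Spec_brute (a : Int) (out : Int) : Prop := out = brute_alt a
instance (a : Int) (out : Int) : Decidable (Spec_brute a out) := by unfold Spec_brute; infer_instance

-- ===== CLAIM (what is proved, stated in full; the proofs are below) =====
def Claim_equal_brute : Prop := ∀ (a : Int), Dom_brute a → Spec_brute a (brute a)

-- ===== LEMMAS AND PROOFS =====

-- the membership test A applies to each i
def condA (i : Int) : Bool :=
  PySem.List.count ((PySem.List.slice? (pyDigitsA i) none none (-1)).getD []) 2 == 0

lemma pyDigitsA_nonpos (i : Int) (h : i ≤ 0) : pyDigitsA i = [] := by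
  rw [pyDigitsA, dif_neg (by omega)]

lemma bf_zero : bf 0 = (1, true) := by
  rw [bf, dif_neg (by omega)]

lemma condA_zero : condA 0 = true := by
  unfold condA
  rw [pyDigitsA_nonpos 0 le_rfl]
  simp [PySem.List.slice?_none_none_neg_one, PySem.List.count_eq]

lemma condA_pos (i : Int) (h : 0 < i) :
    condA i = ((PySem.Int.mod i 3 != 2) && condA (PySem.Int.floordiv i 3)) := by
  unfold condA
  rw [pyDigitsA, dif_pos h]
  simp only [PySem.List.slice?_none_none_neg_one, Option.getD_some, PySem.List.count_eq,
    List.count_reverse, List.count_cons]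
  rw [PySem.Int.mod_eq_emod_of_pos (a := i) (by omega : (0:Int) < 3)]
  by_cases h2 : i % 3 = 2
  · simp [h2]
  · simp [h2]

-- A's fold as a recurrence in a
lemma brute_neg (a : Int) (h : a < 0) : brute a = 0 := by
  unfold brute
  rw [PySem.List.pyRange_one_eq_nil (by omega)]
  rfl

lemma brute_succ (a : Int) (h : 0 ≤ a) :
    brute a = brute (a - 1) + (if condA a then 1 else 0) := by
  unfold brute
  rw [show a + 1 = (a - 1 + 1) + 1 by ring,
      PySem.List.pyRange_one_succ_right (by omega),
      List.foldl_append]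
  simp only [List.foldl_cons, List.foldl_nil]
  have : (a - 1 + 1) = a := by ring
  rw [this]
  unfold condA
  split <;> simp

lemma brute_zero : brute 0 = 1 := by
  rw [brute_succ 0 le_rfl, condA_zero]
  norm_num [brute_neg (-1) (by omega)]

-- bf's Bool component is A's test
lemma bf_snd (k : Nat) : ∀ n : Int, 0 ≤ n → n.toNat ≤ k → (bf n).2 = condA n := by
  induction k with
  | zero =>
    intro n h0 hk
    have h : n = 0 := by omega
    subst h; simp [bf_zero, condA_zero]
  | succ k ih =>
    intro n h0 hk
    by_cases hp : 0 < n
    · have hq3 : PySem.Int.floordiv n 3 = n / 3 :=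
        PySem.Int.floordiv_eq_ediv_of_pos (by omega)
      have hm3 : PySem.Int.mod n 3 = n % 3 := PySem.Int.mod_eq_emod_of_pos (by omega)
      have hrec := ih (PySem.Int.floordiv n 3) (by rw [hq3]; omega) (by rw [hq3]; omega)
      rw [bf, dif_pos hp, condA_pos n hp]
      rw [hq3] at hrec
      simp only [hrec, hm3, hq3]
      by_cases h2 : n % 3 = 2
      · simp [h2]
      · have hle : n % 3 ≤ 1 := by omega
        simp [h2, hle, Bool.and_comm]
    · have h : n = 0 := by omega
      subst h; simp [bf_zero, condA_zero]

-- bf's Int component satisfies A's per-step recurrence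
lemma bf_fst_succ (k : Nat) :
    ∀ n : Int, 1 ≤ n → n.toNat ≤ k →
      (bf n).1 = (bf (n - 1)).1 + (if condA n then 1 else 0) := by
  induction k with
  | zero => intro n h1 hk; omega
  | succ k ih =>
    intro n h1 hk
    have hq3 : PySem.Int.floordiv n 3 = n / 3 :=
      PySem.Int.floordiv_eq_ediv_of_pos (by omega)
    have hm3 : PySem.Int.mod n 3 = n % 3 := PySem.Int.mod_eq_emod_of_pos (by omega)
    have hcond : condA n = ((PySem.Int.mod n 3 != 2) && condA (PySem.Int.floordiv n 3)) :=
      condA_pos n (by omega)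
    have hsnd : (bf (n / 3)).2 = condA (n / 3) := by
      rw [← hq3]
      exact bf_snd k _ (by rw [hq3]; omega) (by rw [hq3]; omega)
    rw [bf, dif_pos (by omega : (0:Int) < n)]
    by_cases hr0 : n % 3 = 0
    · -- n = 3q with q ≥ 1; n - 1 = 3(q-1) + 2
      have hn3 : 3 ≤ n := by omega
      rw [bf, dif_pos (by omega : (0:Int) < n - 1)]
      have hq' : PySem.Int.floordiv (n - 1) 3 = n / 3 - 1 := by
        rw [PySem.Int.floordiv_eq_ediv_of_pos (by omega)]; omega
      have hm' : PySem.Int.mod (n - 1) 3 = 2 := by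
        rw [PySem.Int.mod_eq_emod_of_pos (by omega)]; omega
      have hih : (bf (n / 3)).1 = (bf (n / 3 - 1)).1 + (if condA (n / 3) then 1 else 0) :=
        ih (n / 3) (by omega) (by omega)
      simp only [hq3, hq', hm', hm3, hr0, hcond, hsnd]
      by_cases hg : condA (n / 3)
      · simp only [hg, hih]
        simp
        omega
      · simp only [hg, hih]
        simp
        omega
    · -- n % 3 ∈ {1, 2}: n and n - 1 share the base-3 quotient
      by_cases hn1 : n = 1
      · subst hn1
        simp [bf_zero, condA_pos 1 one_pos, condA_zero]
      · rw [bf, dif_pos (by omega : (0:Int) < n - 1)]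
        have hq' : PySem.Int.floordiv (n - 1) 3 = n / 3 := by
          rw [PySem.Int.floordiv_eq_ediv_of_pos (by omega)]; omega
        have hm' : PySem.Int.mod (n - 1) 3 = n % 3 - 1 := by
          rw [PySem.Int.mod_eq_emod_of_pos (by omega)]; omega
        simp only [hq3, hq', hm', hm3, hcond, hsnd]
        by_cases hg : condA (n / 3)
        · by_cases hr1 : n % 3 = 1
          · simp [hg, hr1]
          · have hr2 : n % 3 = 2 := by omega
            simp [hg, hr2]
        · simp [hg]

lemma brute_eq_bf (k : Nat) : ∀ n : Int, 0 ≤ n → n.toNat ≤ k → brute n = (bf n).1 := by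
  induction k with
  | zero =>
    intro n h0 hk
    have h : n = 0 := by omega
    subst h; simp [brute_zero, bf_zero]
  | succ k ih =>
    intro n h0 hk
    by_cases h1 : 1 ≤ n
    · rw [brute_succ n (by omega), bf_fst_succ (k + 1) n h1 hk,
        ih (n - 1) (by omega) (by omega)]
    · have h : n = 0 := by omega
      subst h; simp [brute_zero, bf_zero]

-- ===== VERDICT (by name: the statement is the Claim_ definition above) =====
theorem brute_spec : Claim_equal_brute := by
  intro a _
  unfold Spec_brute brute_alt
  by_cases h : a < 0
  · rw [if_pos h, brute_neg a h]
  · rw [if_neg h]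
    exact brute_eq_bf a.toNat a (by omega) le_rfl
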